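-- pv_equiv track=rewrite | github.com/richardfearn/advent-of-code-2024 | day17/__init__.py | run_input_program
-- ===== SOURCE A (Python) =====
-- def run_input_program(a, iterations):
--     output = []
--
--     for _ in range(iterations):
--         b = a % 8
--         b = b ^ 7
--         c = a // (2 ** b)
--         a = a // 8
--         b = b ^ 7
--         b = b ^ c
--         output.append(b % 8)
--
--     return output
-- ===== SOURCE B (Python) =====
-- def run_input_program(a, iterations):
--     # Stage 1: precompute the output digit for every possible 10-bit window value.
--     table = [((w & 7) ^ (w >> ((w & 7) ^ 7))) & 7 for w in range(1024)]
--     # Stage 2: digit k depends only on the 10-bit window of a starting at bit 3k.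
--     return [table[(a >> (3 * k)) & 1023] for k in range(iterations)]
-- ===== Notes on version B (the rewrite author's own statement) =====
-- stated objective: alternative
-- what changed: B replaces A's sequential loop with a mutating accumulator by a two-stage table-lookup scheme: it first precomputes the output digit for each of the 1024 possible 10-bit windows, then reads each digit off a by indexing the table with the 10-bit window at bit offset 3k (no threaded state; per step just a shift, a mask and a list lookup instead of A's pow and two floor divisions).
import Mathlib
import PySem

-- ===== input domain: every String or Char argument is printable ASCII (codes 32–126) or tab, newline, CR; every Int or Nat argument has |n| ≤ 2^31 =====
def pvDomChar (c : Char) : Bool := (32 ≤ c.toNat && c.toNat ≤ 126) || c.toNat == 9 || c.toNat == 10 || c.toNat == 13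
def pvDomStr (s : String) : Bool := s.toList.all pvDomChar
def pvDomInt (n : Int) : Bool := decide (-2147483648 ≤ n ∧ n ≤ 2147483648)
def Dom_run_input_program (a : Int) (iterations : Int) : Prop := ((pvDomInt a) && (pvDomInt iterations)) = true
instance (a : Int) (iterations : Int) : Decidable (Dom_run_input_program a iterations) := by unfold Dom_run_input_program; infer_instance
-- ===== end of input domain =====

-- B replaces A's sequential loop with mutating accumulator by a two-stage table-lookup:
-- a precomputed 1024-entry digit table for every 10-bit window, then one shift-mask-lookup
-- per output position; objective: alternative (a genuinely different algorithm; the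
-- timing run measured B faster by a constant factor).


-- ===== PORT A =====
-- literal transliteration of A's loop; '2 ** b' is ported as '2 ^ b.toNat'
-- (exact here: b = (a % 8) ^ 7 is always in 0..7, so Python's 2 ** b is an integer power)
def run_input_program (a : Int) (iterations : Int) : List Int :=
  ((PySem.List.pyRange 0 iterations 1).foldl
    (fun (st : List Int × Int) _ =>
      let output := st.1
      let a := st.2
      let b := PySem.Int.mod a 8
      let b := PySem.Int.bxor b 7
      let c := PySem.Int.floordiv a (2 ^ b.toNat)
      let a := PySem.Int.floordiv a 8
      let b := PySem.Int.bxor b 7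
      let b := PySem.Int.bxor b c
      (output ++ [PySem.Int.mod b 8], a))
    ([], a)).1

-- ===== PORT B =====
-- literal transliteration of Source B: a 1024-entry precomputed table, then per-k lookups.
-- Python '>>' is '>>>' (shift amounts 3*k and (w&7)^7 are nonnegative, so .toNat is exact);
-- 'table[i]' is ported as pyGetD with default 0: the index (x & 1023) is provably in 0..1023,
-- so the default never fires and the Python indexing never raises.
def run_input_program_alt (a : Int) (iterations : Int) : List Int :=
  let table := (PySem.List.pyRange 0 1024 1).map (fun w =>
    PySem.Int.band
      (PySem.Int.bxor (PySem.Int.band w 7)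
        (w >>> (PySem.Int.bxor (PySem.Int.band w 7) 7).toNat)) 7)
  (PySem.List.pyRange 0 iterations 1).map (fun k =>
    PySem.List.pyGetD table (PySem.Int.band (a >>> (3 * k).toNat) 1023) 0)

-- ===== PRECONDITION & SPEC =====
def Spec_run_input_program (a : Int) (iterations : Int) (out : List Int) : Prop := out = run_input_program_alt a iterations
instance (a : Int) (iterations : Int) (out : List Int) : Decidable (Spec_run_input_program a iterations out) := by unfold Spec_run_input_program; infer_instance

-- ===== CLAIM (what is proved, stated in full; the proofs are below) =====
def Claim_equal_run_input_program : Prop := ∀ (a : Int) (iterations : Int), Dom_run_input_program a iterations → Spec_run_input_program a iterations (run_input_program a iterations)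

-- ===== LEMMAS AND PROOFS =====

-- the digit A's loop body emits from state x
def pvDigitA (x : Int) : Int :=
  PySem.Int.mod
    (PySem.Int.bxor (PySem.Int.bxor (PySem.Int.bxor (PySem.Int.mod x 8) 7) 7)
      (PySem.Int.floordiv x (2 ^ (PySem.Int.bxor (PySem.Int.mod x 8) 7).toNat))) 8

-- Python's x >> n is floor division by 2^n
lemma shiftRight_eq_floordiv (x : Int) (n : Nat) :
    x >>> n = PySem.Int.floordiv x (2 ^ n) := by
  rw [PySem.Int.floordiv_eq_ediv_of_pos (by positivity), Int.shiftRight_eq_div_pow]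
  push_cast
  rfl

-- masking with 7 is taking the residue mod 8 (any sign)
lemma band_seven_eq_mod_eight (x : Int) : PySem.Int.band x 7 = PySem.Int.mod x 8 := by
  rw [PySem.Int.mod_eq_emod_of_pos (by norm_num)]
  by_cases hx : 0 ≤ x
  · rw [PySem.Int.band_of_nonneg hx (by norm_num)]
    have h7 : (7 : Int).toNat = 7 := rfl
    rw [h7, Nat.and_two_pow_sub_one_eq_mod x.toNat 3]
    omega
  · have hbr : PySem.Int.band x 7 = ((7 : Int).toNat - ((7 : Int).toNat &&& (-x - 1).toNat) : Nat) := by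
      simp [PySem.Int.band, hx]
    rw [hbr]
    have h7 : (7 : Int).toNat = 7 := rfl
    rw [h7, Nat.and_comm, Nat.and_two_pow_sub_one_eq_mod (-x - 1).toNat 3]
    omega

-- masking with 1023 is taking the residue mod 1024 (any sign)
lemma band_1023_eq_mod_1024 (x : Int) : PySem.Int.band x 1023 = PySem.Int.mod x 1024 := by
  rw [PySem.Int.mod_eq_emod_of_pos (by norm_num)]
  by_cases hx : 0 ≤ x
  · rw [PySem.Int.band_of_nonneg hx (by norm_num)]
    have h10 : (1023 : Int).toNat = 1023 := rfl
    rw [h10, Nat.and_two_pow_sub_one_eq_mod x.toNat 10]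
    omega
  · have hbr : PySem.Int.band x 1023 = ((1023 : Int).toNat - ((1023 : Int).toNat &&& (-x - 1).toNat) : Nat) := by
      simp [PySem.Int.band, hx]
    rw [hbr]
    have h10 : (1023 : Int).toNat = 1023 := rfl
    rw [h10, Nat.and_comm, Nat.and_two_pow_sub_one_eq_mod (-x - 1).toNat 10]
    omega

lemma bxor_seven_seven (m : Nat) :
    PySem.Int.bxor (PySem.Int.bxor (m : Int) 7) 7 = (m : Int) := by
  have h7 : (7 : Int) = ((7 : Nat) : Int) := rfl
  rw [h7, PySem.Int.bxor_natCast, PySem.Int.bxor_natCast, Nat.xor_xor_cancel_right]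

-- the double XOR in A cancels: pvDigitA simplifies to low ^ (x // 2^(low^7)) mod 8
lemma digitA_eq (x : Int) :
    pvDigitA x =
      PySem.Int.mod
        (PySem.Int.bxor (PySem.Int.mod x 8)
          (PySem.Int.floordiv x (2 ^ (PySem.Int.bxor (PySem.Int.mod x 8) 7).toNat))) 8 := by
  unfold pvDigitA
  have h0 : 0 ≤ PySem.Int.mod x 8 := PySem.Int.mod_nonneg _ (by norm_num)
  have hm : PySem.Int.mod x 8 = ((PySem.Int.mod x 8).toNat : Int) := (Int.toNat_of_nonneg h0).symm
  rw [hm, bxor_seven_seven]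

-- Python's x >> n with the shift amount written as an Int-cast Nat
lemma intShift_eq_floordiv (x : Int) (n : Nat) :
    x >>> (n : Int) = PySem.Int.floordiv x (2 ^ n) := by
  rw [Int.shiftRight_natCast_right]
  exact shiftRight_eq_floordiv x n

-- B's table body at w equals A's digit of w
lemma tableBody_eq_digitA (x : Int) :
    (PySem.Int.band (PySem.Int.bxor (PySem.Int.band x 7)
        (x >>> (PySem.Int.bxor (PySem.Int.band x 7) 7).toNat)) 7) = pvDigitA x := by
  rw [digitA_eq, band_seven_eq_mod_eight, band_seven_eq_mod_eight, shiftRight_eq_floordiv]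

-- 7 - w is w XOR 7 below 8
lemma seven_sub_eq_xor (w : Nat) (h : w < 8) : 7 - w = w ^^^ 7 := by
  interval_cases w <;> decide

-- low 3 bits of an XOR: mod 8 of bxor L c depends only on L mod 8 and c mod 8
lemma mod8_bxor (L c : Int) (hL : 0 ≤ L) :
    PySem.Int.mod (PySem.Int.bxor L c) 8 =
      ((L.toNat % 8) ^^^ (PySem.Int.mod c 8).toNat : Nat) := by
  have hxm : ∀ u v : Nat, (u ^^^ v) % 8 = (u % 8) ^^^ (v % 8) := by
    intro u v
    have h : (u ^^^ v) &&& 7 = (u &&& 7) ^^^ (v &&& 7) := Nat.and_xor_distrib_right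
    rw [Nat.and_two_pow_sub_one_eq_mod u 3, Nat.and_two_pow_sub_one_eq_mod v 3,
        Nat.and_two_pow_sub_one_eq_mod (u ^^^ v) 3] at h
    exact h
  by_cases hc : 0 ≤ c
  · have hb : PySem.Int.bxor L c = ((L.toNat ^^^ c.toNat : Nat) : Int) := by
      simp [PySem.Int.bxor, hL, hc]
    have h1 : PySem.Int.mod ((L.toNat ^^^ c.toNat : Nat) : Int) 8
        = (((L.toNat ^^^ c.toNat) % 8 : Nat) : Int) := by
      have := PySem.Int.mod_natCast (L.toNat ^^^ c.toNat) 8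
      rw [show ((8:Nat):Int) = (8:Int) from rfl] at this
      exact this
    have hcm : (PySem.Int.mod c 8).toNat = c.toNat % 8 := by
      rw [PySem.Int.mod_eq_emod_of_pos (by norm_num)]
      omega
    rw [hb, h1, hxm, hcm]
  · set t := (-c - 1).toNat with ht
    have hb : PySem.Int.bxor L c = -((L.toNat ^^^ t : Nat) : Int) - 1 := by
      simp [PySem.Int.bxor, hL, hc, ht]
    have hmneg : ∀ m : Nat, PySem.Int.mod (-(m : Int) - 1) 8 = ((7 - m % 8 : Nat) : Int) := by
      intro m
      rw [PySem.Int.mod_eq_emod_of_pos (by norm_num)]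
      omega
    rw [hb, hmneg]
    have hcm : (PySem.Int.mod c 8).toNat = 7 - t % 8 := by
      rw [PySem.Int.mod_eq_emod_of_pos (by norm_num)]
      omega
    rw [hcm, hxm,
        seven_sub_eq_xor _ (Nat.xor_lt_two_pow (n := 3) (by norm_num [Nat.mod_lt]) (by norm_num [Nat.mod_lt])),
        seven_sub_eq_xor _ (by omega), Nat.xor_assoc]

-- A's digit only reads the low 10 bits: pvDigitA (x mod 1024) = pvDigitA x
lemma digitA_mod_1024 (x : Int) : pvDigitA (PySem.Int.mod x 1024) = pvDigitA x := by
  set y := PySem.Int.mod x 1024 with hy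
  have hym : PySem.Int.mod y 8 = PySem.Int.mod x 8 := by
    rw [hy, PySem.Int.mod_eq_emod_of_pos (b := (1024:Int)) (by norm_num),
        PySem.Int.mod_eq_emod_of_pos (b := (8:Int)) (by norm_num),
        PySem.Int.mod_eq_emod_of_pos (b := (8:Int)) (by norm_num)]
    exact Int.emod_emod_of_dvd x (by norm_num)
  rw [digitA_eq, digitA_eq, hym]
  set L := PySem.Int.mod x 8 with hL
  have hL0 : 0 ≤ L := PySem.Int.mod_nonneg _ (by norm_num)
  have hL8 : L < 8 := PySem.Int.mod_lt x (by norm_num)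
  set s := (PySem.Int.bxor L 7).toNat with hs
  have hs8 : s ≤ 7 := by
    have hb : PySem.Int.bxor L 7 = ((L.toNat ^^^ 7 : Nat) : Int) := by
      conv_lhs => rw [← Int.toNat_of_nonneg hL0]
      rw [show (7:Int) = ((7:Nat):Int) from rfl, PySem.Int.bxor_natCast]
    have hlt : L.toNat ^^^ 7 < 8 := Nat.xor_lt_two_pow (n := 3) (by omega) (by omega)
    rw [hs, hb]
    omega
  -- floordiv y 2^s and floordiv x 2^s agree mod 8
  have key : PySem.Int.mod (PySem.Int.floordiv y (2 ^ s)) 8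
           = PySem.Int.mod (PySem.Int.floordiv x (2 ^ s)) 8 := by
    have hpow : (1024 : Int) = 2 ^ s * (2 ^ (10 - s)) := by
      rw [← pow_add]
      norm_num [Nat.add_sub_cancel' (by omega : s ≤ 10)]
    obtain ⟨q, hq⟩ : ∃ q : Int, y = x + (-(2 ^ (10 - s) * q)) * 2 ^ s := by
      refine ⟨x / 1024, ?_⟩
      rw [hy, PySem.Int.mod_eq_emod_of_pos (by norm_num), Int.emod_def]
      rw [show (1024 : Int) * (x / 1024) = 2 ^ (10 - s) * (x / 1024) * 2 ^ s by
        rw [show (2:Int) ^ (10 - s) * (x / 1024) * 2 ^ s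
              = 2 ^ s * 2 ^ (10 - s) * (x / 1024) by ring, ← hpow]]
      ring
    have hdivy : PySem.Int.floordiv y (2 ^ s)
        = PySem.Int.floordiv x (2 ^ s) + -(2 ^ (10 - s) * q) := by
      rw [PySem.Int.floordiv_eq_ediv_of_pos (by positivity),
          PySem.Int.floordiv_eq_ediv_of_pos (by positivity), hq]
      exact Int.add_mul_ediv_right _ _ (by positivity : (0:Int) < 2 ^ s).ne'
    obtain ⟨m, hm⟩ : (8 : Int) ∣ 2 ^ (10 - s) := by
      refine ⟨2 ^ (10 - s - 3), ?_⟩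
      rw [show (8:Int) = 2 ^ 3 from rfl, ← pow_add]
      congr 1
      omega
    rw [hdivy, hm, PySem.Int.mod_eq_emod_of_pos (by norm_num),
        PySem.Int.mod_eq_emod_of_pos (by norm_num)]
    rw [show PySem.Int.floordiv x (2 ^ s) + -(8 * m * q)
          = PySem.Int.floordiv x (2 ^ s) + (-(m * q)) * 8 by ring]
    exact Int.add_mul_emod_self_right _ _ _
  rw [mod8_bxor _ _ hL0, mod8_bxor _ _ hL0, key]

-- floor-dividing twice by powers of two composes
lemma floordiv_pow_pow (x : Int) (m n : Nat) :
    PySem.Int.floordiv (PySem.Int.floordiv x (2 ^ m)) (2 ^ n) =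
      PySem.Int.floordiv x (2 ^ (m + n)) := by
  rw [PySem.Int.floordiv_eq_ediv_of_pos (b := (2:Int) ^ m) (by positivity),
      PySem.Int.floordiv_eq_ediv_of_pos (by positivity),
      PySem.Int.floordiv_eq_ediv_of_pos (by positivity),
      Int.ediv_ediv_of_nonneg (by positivity), pow_add]

-- loop characterisation: A's fold over any list yields the per-index digits of a // 8^k
lemma foldA_char (l : List Int) : ∀ (out : List Int) (a : Int),
    (l.foldl
      (fun (st : List Int × Int) _ =>
        let output := st.1
        let a := st.2
        let b := PySem.Int.mod a 8
        let b := PySem.Int.bxor b 7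
        let c := PySem.Int.floordiv a (2 ^ b.toNat)
        let a := PySem.Int.floordiv a 8
        let b := PySem.Int.bxor b 7
        let b := PySem.Int.bxor b c
        (output ++ [PySem.Int.mod b 8], a))
      (out, a)).1 =
      out ++ (List.range l.length).map (fun k => pvDigitA (PySem.Int.floordiv a (2 ^ (3 * k)))) := by
  induction l with
  | nil => simp
  | cons hd tl ih =>
    intro out a
    simp only [List.foldl_cons]
    rw [ih]
    rw [List.length_cons, List.range_succ_eq_map, List.map_cons, List.map_map,
        List.append_assoc, List.singleton_append]
    have h8 : (8 : Int) = 2 ^ 3 := by norm_num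
    have hhead :
        PySem.Int.mod
          (PySem.Int.bxor (PySem.Int.bxor (PySem.Int.bxor (PySem.Int.mod a 8) 7) 7)
            (PySem.Int.floordiv a (2 ^ (PySem.Int.bxor (PySem.Int.mod a 8) 7).toNat))) 8
          = pvDigitA (PySem.Int.floordiv a (2 ^ (3 * 0))) := by
      simp [pvDigitA, PySem.Int.floordiv]
    have htail :
        List.map (fun k => pvDigitA (PySem.Int.floordiv (PySem.Int.floordiv a 8) (2 ^ (3 * k))))
            (List.range tl.length)
          = List.map ((fun k => pvDigitA (PySem.Int.floordiv a (2 ^ (3 * k)))) ∘ Nat.succ)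
            (List.range tl.length) := by
      refine List.map_congr_left fun k hk => ?_
      simp only [Function.comp_apply, h8, floordiv_pow_pow]
      have h3 : 3 + 3 * k = 3 * Nat.succ k := by omega
      rw [h3]
    rw [hhead, htail]

-- ===== VERDICT (by name: the statement is the Claim_ definition above) =====
theorem run_input_program_spec : Claim_equal_run_input_program := by
  intro a iterations _
  unfold Spec_run_input_program run_input_program run_input_program_alt
  rw [foldA_char, PySem.List.length_pyRange_one, PySem.List.pyRange_one (a := 0) (b := iterations), List.map_map]
  simp only [List.nil_append, intShift_eq_floordiv]
  congr 1
  funext k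
  simp only [Function.comp_apply, zero_add]
  rw [band_1023_eq_mod_1024]
  rw [PySem.List.pyGetD_map_pyRange_of_nonneg _ _ _ _
        (PySem.Int.mod_nonneg _ (by norm_num)) (PySem.Int.mod_lt _ (by norm_num))]
  rw [tableBody_eq_digitA, digitA_mod_1024]
  have he : ((3 * (k : Int)).toNat) = 3 * k := by omega
  rw [he]
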